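-- pv_equiv track=rewrite | github.com/Thomas-Nessen/bookkeeping-app | models/display_class.py | create_input_text_cat
-- ===== SOURCE A (Python) =====
-- def create_input_text_cat(sorting_codes:dict):
--     '''
--     This function create a dynamic display text of the categories in the sorting_codes.
--     It return also the number of total options (including the 0. Skip)
--     '''
--     index_w_enter = [0]
--     index_w_enter.extend(range(3,len(sorting_codes),3))
--     output = "What category does this transactions belongs to:\n"
--     for i, cat in enumerate(sorting_codes.keys()):
--         if i in index_w_enter:
--             output += "\n"
--         col_txt= f"{str(i+1)}: {cat}"
--         output += '{:<20}'.format(col_txt)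
--     output += "\n0. Skip this row"
--     return output, (len(sorting_codes)+1)
-- ===== SOURCE B (Python) =====
-- def create_input_text_cat(sorting_codes: dict):
--     cells = ['{:<20}'.format(f"{i + 1}: {cat}") for i, cat in enumerate(sorting_codes)]
--     rows = ["".join(cells[k:k + 3]) for k in range(0, len(cells), 3)]
--     output = "What category does this transactions belongs to:\n"
--     output += "".join("\n" + row for row in rows)
--     output += "\n0. Skip this row"
--     return output, len(sorting_codes) + 1
-- ===== Notes on version B (the rewrite author's own statement) =====
-- stated objective: faster
-- what changed: B formats all cells once, partitions them into rows of three via range-stepped slicing and joins the rows with newlines, removing A's per-element 'i in index_w_enter' list-membership test (a linear scan inside the loop).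
import Mathlib
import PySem

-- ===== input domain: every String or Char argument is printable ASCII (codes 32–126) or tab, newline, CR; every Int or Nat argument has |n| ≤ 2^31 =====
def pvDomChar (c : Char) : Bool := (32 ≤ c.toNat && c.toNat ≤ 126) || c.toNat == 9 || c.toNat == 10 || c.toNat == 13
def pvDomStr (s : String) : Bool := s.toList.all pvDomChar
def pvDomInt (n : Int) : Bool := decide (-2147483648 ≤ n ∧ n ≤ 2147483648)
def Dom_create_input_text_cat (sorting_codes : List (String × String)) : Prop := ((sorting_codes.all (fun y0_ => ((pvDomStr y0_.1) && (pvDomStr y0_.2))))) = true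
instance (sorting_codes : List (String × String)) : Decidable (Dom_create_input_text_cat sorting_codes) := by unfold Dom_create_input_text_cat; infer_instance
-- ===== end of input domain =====

-- B formats all cells once, partitions them into rows of three by slicing, and joins the rows,
-- removing A's per-element membership scan of the newline-index list (objective: faster, measured).

-- '{:<20}'.format(s) for ASCII s: left-justify to width 20 with spaces (shared by both Pythons)
def pvPad20 (cs : List Char) : List Char := cs ++ List.replicate (20 - cs.length) ' '

-- ===== PORT A =====
def create_input_text_cat (sorting_codes : List (String × String)) : String × Int :=
  let d := PySem.Dict.ofList sorting_codes
  let index_w_enter : List Int := [0] ++ PySem.List.pyRange 3 (d.size : Int) 3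
  let output0 := String.toList "What category does this transactions belongs to:\n"
  let output := (PySem.List.enumerate d.keys).foldl (fun out p =>
      let out := if p.1 ∈ index_w_enter then out ++ ['\n'] else out
      let col_txt := PySem.Int.toChars (p.1 + 1) ++ String.toList ": " ++ p.2.toList
      out ++ pvPad20 col_txt) output0
  (String.ofList (output ++ String.toList "\n0. Skip this row"), ((d.size : Int) + 1))

-- ===== PORT B =====
def create_input_text_cat_alt (sorting_codes : List (String × String)) : String × Int :=
  let d := PySem.Dict.ofList sorting_codes
  let cells := (PySem.List.enumerate d.keys).map (fun p =>
      pvPad20 (PySem.Int.toChars (p.1 + 1) ++ String.toList ": " ++ p.2.toList))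
  let rows := (PySem.List.pyRange 0 (cells.length : Int) 3).map (fun k =>
      PySem.Chars.join [] (PySem.List.slice cells (some k) (some (k + 3))))
  let output := String.toList "What category does this transactions belongs to:\n"
      ++ PySem.Chars.join [] (rows.map (fun r => '\n' :: r))
      ++ String.toList "\n0. Skip this row"
  (String.ofList output, ((d.size : Int) + 1))

-- ===== PRECONDITION & SPEC =====
def Spec_create_input_text_cat (sorting_codes : List (String × String)) (out : String × Int) : Prop := out = create_input_text_cat_alt sorting_codes
instance (sorting_codes : List (String × String)) (out : String × Int) : Decidable (Spec_create_input_text_cat sorting_codes out) := by unfold Spec_create_input_text_cat; infer_instance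

-- ===== CLAIM (what is proved, stated in full; the proofs are below) =====
def Claim_equal_create_input_text_cat : Prop := ∀ (sorting_codes : List (String × String)), Dom_create_input_text_cat sorting_codes → Spec_create_input_text_cat sorting_codes (create_input_text_cat sorting_codes)

-- ===== LEMMAS AND PROOFS =====

-- reference chunked body: one '\n' before every group of three cells
def pvG : List (List Char) → List Char
  | [] => []
  | c :: rest => '\n' :: (c ++ (rest.take 2).flatten) ++ pvG (rest.drop 2)
  termination_by cs => cs.length
  decreasing_by simp

theorem pvJoinNilFlatten (l : List (List Char)) : PySem.Chars.join [] l = l.flatten := by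
  induction l with
  | nil => simp
  | cons a t ih =>
    cases t with
    | nil => simp [PySem.Chars.join_singleton]
    | cons b t' => simp [PySem.Chars.join_cons_cons, ih]

theorem pvMemIdx (i n : Int) (h0 : 0 ≤ i) (hin : i < n) :
    (i ∈ ([0] ++ PySem.List.pyRange 3 n 3)) ↔ i % 3 = 0 := by
  simp only [List.mem_append, List.mem_singleton,
    PySem.List.mem_pyRange_iff_of_pos (by norm_num : (0:Int) < 3)]
  omega

theorem pvEnumMap {α β : Type} (l : List α) (j : Int) (f : Int × α → β) :
    PySem.List.enumerate ((PySem.List.enumerate l j).map (fun p => f p)) j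
      = (PySem.List.enumerate l j).map (fun p => (p.1, f p)) := by
  induction l generalizing j with
  | nil => simp [PySem.List.enumerate]
  | cons a t ih => simp [PySem.List.enumerate, ih]

theorem pvFoldA : ∀ (cells : List (List Char)) (acc : List Char) (j : Int), j % 3 = 0 →
    (PySem.List.enumerate cells j).foldl
      (fun out q => (if q.1 % 3 = 0 then out ++ ['\n'] else out) ++ q.2) acc
      = acc ++ pvG cells
  | [], acc, j, hj => by simp [PySem.List.enumerate, pvG]
  | [a], acc, j, hj => by
      simp only [PySem.List.enumerate, List.foldl_cons, List.foldl_nil]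
      rw [if_pos hj]
      simp [pvG]
  | [a, b], acc, j, hj => by
      have h1 : ¬ (j + 1) % 3 = 0 := by omega
      simp only [PySem.List.enumerate, List.foldl_cons, List.foldl_nil]
      rw [if_pos hj, if_neg h1]
      simp [pvG]
  | a :: b :: c :: rest, acc, j, hj => by
      have h1 : ¬ (j + 1) % 3 = 0 := by omega
      have h2 : ¬ (j + 1 + 1) % 3 = 0 := by omega
      simp only [PySem.List.enumerate, List.foldl_cons]
      rw [if_pos hj, if_neg h1, if_neg h2]
      rw [pvFoldA rest _ (j + 1 + 1 + 1) (by omega)]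
      simp [pvG]

theorem pvJoinChunks : ∀ (cells : List (List Char)) (m : Nat), m = (cells.length + 2) / 3 →
    ((List.range m).map (fun t => '\n' :: ((cells.drop (3 * t)).take 3).flatten)).flatten
      = pvG cells
  | [], m, hm => by subst hm; simp [pvG]
  | a :: rest, m, hm => by
      obtain ⟨m', rfl⟩ : ∃ m', m = m' + 1 := ⟨m - 1, by simp at hm; omega⟩
      rw [List.range_succ_eq_map]
      simp only [List.map_cons, List.map_map, List.flatten_cons]
      have hrec : ((List.range m').map
          (fun t => '\n' :: (((a :: rest).drop (3 * (t + 1))).take 3).flatten)).flatten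
          = pvG (rest.drop 2) := by
        have heq : ∀ t, ((a :: rest).drop (3 * (t + 1))) = ((rest.drop 2).drop (3 * t)) := by
          intro t
          rw [List.drop_drop, show 3 * (t + 1) = (3 * t + 2) + 1 from by ring,
            List.drop_succ_cons]
          congr 1
          omega
        calc ((List.range m').map
              (fun t => '\n' :: (((a :: rest).drop (3 * (t + 1))).take 3).flatten)).flatten
            = ((List.range m').map
              (fun t => '\n' :: (((rest.drop 2).drop (3 * t)).take 3).flatten)).flatten := by
              simp only [heq]
          _ = pvG (rest.drop 2) := pvJoinChunks (rest.drop 2) m' (by simp at hm ⊢; omega)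
      have hcomp : ((fun t => '\n' ::
          (((a :: rest).drop (3 * t)).take 3).flatten) ∘ Nat.succ)
          = (fun t => '\n' :: (((a :: rest).drop (3 * (t + 1))).take 3).flatten) := by
        funext t; rfl
      rw [hcomp, hrec]
      cases rest with
      | nil => simp [pvG]
      | cons b t => cases t with
        | nil => simp [pvG]
        | cons c u => simp [pvG]
  termination_by cells => cells.length
  decreasing_by simp

-- B's rows/join expression equals the reference chunked body
theorem pvBodyB (cells : List (List Char)) :
    PySem.Chars.join []
      (((PySem.List.pyRange 0 (cells.length : Int) 3).map (fun k =>
        PySem.Chars.join [] (PySem.List.slice cells (some k) (some (k + 3))))).map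
        (fun r => '\n' :: r))
      = pvG cells := by
  have hsl : ∀ t : Nat, PySem.List.slice cells (some (0 + 3 * (t : Int)))
      (some (0 + 3 * (t : Int) + 3)) = (cells.drop (3 * t)).take 3 := by
    intro t
    have h1 : (0 + 3 * (t : Int) + 3) = ((3 * t : Nat) : Int) + ((3 : Nat) : Int) := by
      push_cast; ring
    have h0 : (0 + 3 * (t : Int)) = ((3 * t : Nat) : Int) := by push_cast; ring
    rw [h1, h0, PySem.List.slice_natCast_add]
  rw [pvJoinNilFlatten,
    PySem.List.pyRange_of_pos 0 (cells.length : Int) (by norm_num : (0:Int) < 3),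
    List.map_map, List.map_map]
  simp only [Function.comp_def, hsl, pvJoinNilFlatten]
  by_cases h : (0 : Int) < (cells.length : Int)
  · rw [if_pos h]
    apply pvJoinChunks
    omega
  · rw [if_neg h]
    have : cells = [] := by
      cases cells with
      | nil => rfl
      | cons a t => exfalso; apply h; simp
    subst this
    simp [pvG]

-- ===== VERDICT (by name: the statement is the Claim_ definition above) =====
theorem create_input_text_cat_spec : Claim_equal_create_input_text_cat := by
  intro sc _
  unfold Spec_create_input_text_cat create_input_text_cat create_input_text_cat_alt
  set d := PySem.Dict.ofList sc with hd
  have hsize : d.size = d.keys.length := by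
    simp [PySem.Dict.size, PySem.Dict.keys]
  refine Prod.ext ?_ rfl
  simp only
  congr 1
  set ks := d.keys with hks
  set cellF : Int × String → List Char := fun p =>
      pvPad20 (PySem.Int.toChars (p.1 + 1) ++ String.toList ": " ++ p.2.toList)
    with hcell
  -- A's fold: replace the index-list membership test by i % 3 = 0
  have hstep1 : (PySem.List.enumerate ks).foldl (fun out p =>
      (if p.1 ∈ ([0] ++ PySem.List.pyRange 3 (d.size : Int) 3)
        then out ++ ['\n'] else out) ++ cellF p)
      (String.toList "What category does this transactions belongs to:\n")
      = (PySem.List.enumerate ks).foldl (fun out p =>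
        (if p.1 % 3 = 0 then out ++ ['\n'] else out) ++ cellF p)
      (String.toList "What category does this transactions belongs to:\n") := by
    apply PySem.List.foldl_congr_mem
    intro acc x hx
    obtain ⟨k, hk, hxe⟩ := (PySem.List.mem_enumerate_iff ks 0 x).mp hx
    have hx1 : x.1 = (k : Int) := by rw [hxe]; simp
    rw [hsize]
    congr 1
    rw [if_congr (pvMemIdx x.1 ks.length (by omega) (by omega)) rfl rfl]
  have hAfold : (PySem.List.enumerate ks).foldl (fun out p =>
      (if p.1 % 3 = 0 then out ++ ['\n'] else out) ++ cellF p)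
      (String.toList "What category does this transactions belongs to:\n")
      = (String.toList "What category does this transactions belongs to:\n")
        ++ pvG ((PySem.List.enumerate ks).map cellF) := by
    rw [← pvFoldA ((PySem.List.enumerate ks).map cellF)
      (String.toList "What category does this transactions belongs to:\n") 0 rfl]
    rw [pvEnumMap ks 0 cellF, List.foldl_map]
  calc (PySem.List.enumerate ks).foldl (fun out p =>
        (if p.1 ∈ ([0] ++ PySem.List.pyRange 3 (d.size : Int) 3)
          then out ++ ['\n'] else out) ++ cellF p)
        (String.toList "What category does this transactions belongs to:\n")
        ++ String.toList "\n0. Skip this row"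
      = (String.toList "What category does this transactions belongs to:\n")
        ++ pvG ((PySem.List.enumerate ks).map cellF) ++ String.toList "\n0. Skip this row" := by
        rw [hstep1, hAfold]
    _ = (String.toList "What category does this transactions belongs to:\n")
        ++ PySem.Chars.join []
          ((((PySem.List.pyRange 0 ((((PySem.List.enumerate ks).map cellF).length : Nat) : Int) 3)).map
            (fun k => PySem.Chars.join []
              (PySem.List.slice ((PySem.List.enumerate ks).map cellF) (some k) (some (k + 3))))).map
            (fun r => '\n' :: r))
        ++ String.toList "\n0. Skip this row" := by
        rw [pvBodyB ((PySem.List.enumerate ks).map cellF)]
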